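-- pv_equiv track=rewrite | github.com/crd2333/ZeldaDemo | utils/heightmap_generator/generate_map.py | generate_mdb
-- ===== SOURCE A (Python) =====
-- def generate_mdb(n):
--     mdb = []
--     i = 0
--     while len(mdb) < n:
--         if i & 0x55555555 == i:
--             mdb.append(i)
--         i += 1
--     return mdb
-- ===== SOURCE B (Python) =====
-- def generate_mdb(n):
--     # Bit-spread each index k into the even bit positions (Morton part1by1):
--     # the k-th smallest int whose bits lie in 0x55555555 is k with its bits
--     # moved from position b to position 2*b.
--     def spread(k):
--         r = 0
--         b = 0
--         while k:
--             r += (k & 1) << (2 * b)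
--             b += 1
--             k >>= 1
--         return r
--     return [spread(k) for k in range(n)]
-- ===== Notes on version B (the rewrite author's own statement) =====
-- stated objective: faster
-- what changed: Instead of scanning every integer i and testing i & 0x55555555 == i, B computes the k-th answer directly by bit-spreading k into the even bit positions (Morton part1by1), one spread per output element.
import Mathlib
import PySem

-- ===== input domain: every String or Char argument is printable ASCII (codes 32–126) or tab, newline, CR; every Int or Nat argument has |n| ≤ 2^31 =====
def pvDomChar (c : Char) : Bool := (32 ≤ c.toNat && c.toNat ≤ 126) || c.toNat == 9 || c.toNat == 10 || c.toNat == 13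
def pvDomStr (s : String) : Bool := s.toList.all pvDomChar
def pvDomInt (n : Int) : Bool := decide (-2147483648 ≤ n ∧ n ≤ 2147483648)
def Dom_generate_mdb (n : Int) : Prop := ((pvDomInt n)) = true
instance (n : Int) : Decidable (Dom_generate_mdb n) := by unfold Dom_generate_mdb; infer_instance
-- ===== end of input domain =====

-- B replaces A's scan of every integer (testing i & 0x55555555 == i) by directly
-- bit-spreading each index k into the even bit positions (Morton part1by1): faster.

-- ===== PORT A =====
-- the while loop, as structural recursion on a fuel that is large enough for every
-- n admitted by Pre_ (the loop runs at most 0x55555556 iterations when n ≤ 65536);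
-- `Int.land` is Python's `&` on ints (i stays ≥ 0 here).
def genAloop (n : Int) (mdb : List Int) (i : Int) : Nat → List Int
  | 0 => mdb
  | fuel+1 =>
    if (mdb.length : Int) < n then
      if Int.land i 0x55555555 = i then genAloop n (mdb ++ [i]) (i+1) fuel
      else genAloop n mdb (i+1) fuel
    else mdb

def generate_mdb (n : Int) : List Int := genAloop n [] 0 0x55555556

-- ===== PORT B =====
-- Source B's inner `while k:` loop: r += (k & 1) << (2*b); b += 1; k >>= 1
def spreadLoop (k r b : Nat) : Nat :=
  if h : k = 0 then r
  else spreadLoop (k >>> 1) (r + (k &&& 1) <<< (2*b)) (b+1)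
decreasing_by
  simp only [Nat.shiftRight_one]
  exact Nat.div_lt_self (Nat.pos_of_ne_zero h) one_lt_two

-- `range(n)` is empty for n ≤ 0, which Int.toNat's clamp reproduces exactly.
def generate_mdb_alt (n : Int) : List Int :=
  (List.range n.toNat).map (fun k => ((spreadLoop k 0 0 : Nat) : Int))

-- ===== PRECONDITION & SPEC =====
-- Only 65536 integers satisfy i & 0x55555555 == i, so A loops forever (never
-- returns) when n > 65536; Pre_ excludes exactly those diverging inputs.
def Pre_generate_mdb (n : Int) : Prop := n ≤ 65536
instance (n : Int) : Decidable (Pre_generate_mdb n) := by unfold Pre_generate_mdb; infer_instance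
def pvWitness_generate_mdb : Int := (5)

def Spec_generate_mdb (n : Int) (out : List Int) : Prop := out = generate_mdb_alt n
instance (n : Int) (out : List Int) : Decidable (Spec_generate_mdb n out) := by unfold Spec_generate_mdb; infer_instance

-- ===== CLAIM (what is proved, stated in full; the proofs are below) =====
def Claim_equal_generate_mdb : Prop := ∀ (n : Int), Dom_generate_mdb n → Pre_generate_mdb n → Spec_generate_mdb n (generate_mdb n)

-- ===== LEMMAS AND PROOFS =====

-- model of B's spread: sp k = k with its bits moved to even positions
def pvSp (k : Nat) : Nat :=
  if h : k = 0 then 0 else 4 * pvSp (k / 2) + k % 2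
decreasing_by exact Nat.div_lt_self (Nat.pos_of_ne_zero h) one_lt_two

lemma pvSp_zero : pvSp 0 = 0 := by simp [pvSp]

lemma pvSp_eq (k : Nat) : pvSp k = 4 * pvSp (k / 2) + k % 2 := by
  by_cases h : k = 0
  · subst h; simp [pvSp_zero]
  · rw [pvSp]; simp [h]

lemma pvSp_lt : ∀ (b a : Nat), a < b → pvSp a < pvSp b := by
  intro b
  induction b using Nat.strong_induction_on with
  | _ b ih =>
    intro a hab
    rw [pvSp_eq a, pvSp_eq b]
    rcases Nat.lt_or_ge (a / 2) (b / 2) with h | h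
    · have hb2 : b / 2 < b := Nat.div_lt_self (by omega) one_lt_two
      have := ih (b / 2) hb2 (a / 2) h
      omega
    · have h2 : a / 2 = b / 2 := by omega
      rw [h2]; omega

lemma pvSp_le (a b : Nat) (h : a ≤ b) : pvSp a ≤ pvSp b := by
  rcases Nat.eq_or_lt_of_le h with rfl | h
  · exact le_refl _
  · exact Nat.le_of_lt (pvSp_lt b a h)

-- bitwise characterisation of i & mask == i
def pvSubBits (a b : Nat) : Prop := ∀ j, a.testBit j = true → b.testBit j = true

lemma pvLand_eq_iff (a b : Nat) : a &&& b = a ↔ pvSubBits a b := by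
  constructor
  · intro h j hj
    have h2 := congrArg (fun x => Nat.testBit x j) h
    simp only [Nat.testBit_land, hj, Bool.true_and] at h2
    exact h2
  · intro h
    apply Nat.eq_of_testBit_eq
    intro j
    rw [Nat.testBit_land]
    cases hc : a.testBit j
    · simp
    · simp [h j hc]

lemma pvSubBits_step (a b : Nat) :
    pvSubBits a b ↔ ((a % 2 = 1 → b % 2 = 1) ∧ pvSubBits (a / 2) (b / 2)) := by
  constructor
  · intro h
    refine ⟨fun h0 => ?_, fun j hj => ?_⟩
    · have := h 0 (by simp [Nat.testBit_zero, h0])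
      simpa [Nat.testBit_zero] using this
    · have := h (j+1) (by simpa [Nat.testBit_add_one] using hj)
      simpa [Nat.testBit_add_one] using this
  · rintro ⟨h0, hs⟩ j hj
    cases j with
    | zero =>
      simp only [Nat.testBit_zero, decide_eq_true_eq] at hj ⊢
      exact h0 hj
    | succ j =>
      simp only [Nat.testBit_add_one] at hj ⊢
      exact hs j hj

def pvMseq : Nat → Nat
  | 0 => 0
  | d+1 => 4 * pvMseq d + 1

def pvGood : Nat → Nat → Prop
  | 0, i => i = 0
  | d+1, i => i % 4 ≤ 1 ∧ pvGood d (i / 4)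

lemma pvMseq16 : pvMseq 16 = 0x55555555 := by decide

lemma pvLand_mseq : ∀ (d i : Nat), (i &&& pvMseq d = i) ↔ pvGood d i := by
  intro d
  induction d with
  | zero =>
    intro i
    show i &&& 0 = i ↔ i = 0
    rw [Nat.and_zero]
    exact eq_comm
  | succ d ih =>
    intro i
    show i &&& (4 * pvMseq d + 1) = i ↔ i % 4 ≤ 1 ∧ pvGood d (i / 4)
    rw [pvLand_eq_iff, pvSubBits_step, pvSubBits_step]
    have e1 : (4 * pvMseq d + 1) % 2 = 1 := by omega
    have e2 : (4 * pvMseq d + 1) / 2 = 2 * pvMseq d := by omega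
    have e3 : (2 * pvMseq d) % 2 = 0 := by omega
    have e4 : (2 * pvMseq d) / 2 = pvMseq d := by omega
    have e5 : i / 2 / 2 = i / 4 := by omega
    rw [e2, e3, e4, e5]
    rw [← pvLand_eq_iff, ih]
    constructor
    · rintro ⟨_, h1, h2⟩
      exact ⟨by omega, h2⟩
    · rintro ⟨h1, h2⟩
      exact ⟨fun _ => e1, by omega, h2⟩

lemma pvGood_sp : ∀ (d k : Nat), k < 2 ^ d → pvGood d (pvSp k) := by
  intro d
  induction d with
  | zero =>
    intro k hk
    have : k = 0 := by simpa using hk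
    subst this
    show pvSp 0 = 0
    exact pvSp_zero
  | succ d ih =>
    intro k hk
    rw [pvSp_eq]
    have h1 : (4 * pvSp (k / 2) + k % 2) % 4 = k % 2 := by omega
    have h2 : (4 * pvSp (k / 2) + k % 2) / 4 = pvSp (k / 2) := by omega
    refine ⟨by omega, ?_⟩
    rw [h2]
    apply ih
    have := Nat.pow_succ 2 d
    omega

def pvCp (i : Nat) : Nat :=
  if h : i = 0 then 0 else 2 * pvCp (i / 4) + i % 4
decreasing_by exact Nat.div_lt_self (Nat.pos_of_ne_zero h) (by omega)

lemma pvCp_zero : pvCp 0 = 0 := by simp [pvCp]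

lemma pvGood_cp : ∀ (d i : Nat), pvGood d i → pvCp i < 2 ^ d ∧ pvSp (pvCp i) = i := by
  intro d
  induction d with
  | zero =>
    intro i hi
    have : i = 0 := hi
    subst this
    simp [pvCp_zero, pvSp_zero]
  | succ d ih =>
    rintro i ⟨h4, hg⟩
    by_cases h : i = 0
    · subst h
      constructor
      · rw [pvCp_zero]; positivity
      · rw [pvCp_zero, pvSp_zero]
    · rw [pvCp]; simp only [h, dite_false]
      obtain ⟨ih1, ih2⟩ := ih (i / 4) hg
      have hp := Nat.pow_succ 2 d
      refine ⟨by omega, ?_⟩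
      rw [pvSp_eq]
      have e1 : (2 * pvCp (i / 4) + i % 4) / 2 = pvCp (i / 4) := by omega
      have e2 : (2 * pvCp (i / 4) + i % 4) % 2 = i % 4 := by omega
      rw [e1, e2, ih2]
      omega

lemma pvNoBetween (m j : Nat) (hm : m < 65536) (h1 : pvSp m < j) (h2 : j < pvSp (m+1)) :
    ¬ (j &&& 0x55555555 = j) := by
  intro h
  have hg : pvGood 16 j := (pvLand_mseq 16 j).mp (by rw [pvMseq16]; exact h)
  obtain ⟨_, hsp⟩ := pvGood_cp 16 j hg
  have a1 : m < pvCp j := by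
    by_contra hc
    have := pvSp_le (pvCp j) m (by omega)
    omega
  have a2 : pvCp j < m + 1 := by
    by_contra hc
    have := pvSp_le (m+1) (pvCp j) (by omega)
    omega
  omega

-- bridge: the Int test in port A is the Nat test
lemma pvLandInt (i : Nat) : (Int.land (↑i) 0x55555555 = (↑i : Int)) ↔ (i &&& 0x55555555 = i) := by
  have h : Int.land (↑i) 0x55555555 = ((i &&& 0x55555555 : Nat) : Int) := rfl
  rw [h, Int.natCast_inj]

-- B's loop computes pvSp
lemma pvSpreadLoop_eq : ∀ (k r b : Nat), spreadLoop k r b = r + pvSp k * 4 ^ b := by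
  intro k
  induction k using Nat.strong_induction_on with
  | _ k ih =>
    intro r b
    by_cases h : k = 0
    · subst h
      rw [spreadLoop]
      simp [pvSp_zero]
    · rw [spreadLoop]
      simp only [h, dite_false]
      have hk2 : k >>> 1 = k / 2 := Nat.shiftRight_one k
      have hlt : k / 2 < k := Nat.div_lt_self (Nat.pos_of_ne_zero h) one_lt_two
      rw [hk2, ih (k / 2) hlt]
      rw [Nat.and_one_is_mod, Nat.shiftLeft_eq, pvSp_eq k]
      have hp : (2 : Nat) ^ (2 * b) = 4 ^ b := by
        rw [pow_mul]; norm_num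
      rw [hp, pow_succ]
      ring

-- the list of the first m answers
def pvL (m : Nat) : List Int := (List.range m).map (fun k => ((pvSp k : Nat) : Int))

lemma pvL_len (m : Nat) : (pvL m).length = m := by simp [pvL]

lemma pvL_succ (m : Nat) : pvL m ++ [((pvSp m : Nat) : Int)] = pvL (m+1) := by
  simp [pvL, List.range_succ]

lemma pvAlt (n : Int) : generate_mdb_alt n = pvL n.toNat := by
  unfold generate_mdb_alt pvL
  apply List.map_congr_left
  intro k _
  rw [pvSpreadLoop_eq]
  simp

-- once mdb has length n.toNat the loop returns it, whatever i and fuel are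
lemma pvTerm (n : Int) (i : Int) (fuel : Nat) : genAloop n (pvL n.toNat) i fuel = pvL n.toNat := by
  cases fuel with
  | zero => rfl
  | succ f =>
    rw [genAloop]
    rw [if_neg]
    rw [pvL_len]
    have := Int.self_le_toNat n
    omega

-- marching i across a gap containing no answers leaves mdb unchanged
lemma pvMarch (n : Int) (m' : Nat) (hm : (m' : Int) < n) :
    ∀ (d i fuel : Nat), fuel ≥ d → (∀ j, i ≤ j → j < i + d → ¬ (j &&& 0x55555555 = j)) →
    genAloop n (pvL m') (↑i) fuel = genAloop n (pvL m') (↑(i + d)) (fuel - d) := by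
  intro d
  induction d with
  | zero => intro i fuel _ _; simp
  | succ d ih =>
    intro i fuel hf hno
    obtain ⟨f, rfl⟩ : ∃ f, fuel = f + 1 := ⟨fuel - 1, by omega⟩
    rw [genAloop]
    rw [if_pos (by rw [pvL_len]; exact hm)]
    rw [if_neg (by rw [pvLandInt]; exact hno i (le_refl i) (by omega))]
    have hc : (↑i + 1 : Int) = ↑(i + 1) := by push_cast; ring
    rw [hc, ih (i+1) f (by omega) (fun j hj1 hj2 => hno j (by omega) (by omega))]
    congr 1 <;> omega

-- main loop invariant: from mdb = first m answers, i = pvSp m, the loop yields all n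
lemma pvMain (n : Int) (hn : n ≤ 65536) :
    ∀ (d m fuel : Nat), n.toNat - m = d → m ≤ n.toNat →
    (m < n.toNat → fuel + pvSp m ≥ pvSp (n.toNat - 1) + 1) →
    genAloop n (pvL m) (↑(pvSp m)) fuel = pvL n.toNat := by
  intro d
  induction d with
  | zero =>
    intro m fuel hd hm _
    have : m = n.toNat := by omega
    subst this
    exact pvTerm n _ fuel
  | succ d ih =>
    intro m fuel hd hm hfuel
    have hmlt : m < n.toNat := by omega
    have hmono : pvSp m ≤ pvSp (n.toNat - 1) := pvSp_le m (n.toNat - 1) (by omega)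
    have hf1 : fuel ≥ 1 := by have := hfuel hmlt; omega
    obtain ⟨f, rfl⟩ : ∃ f, fuel = f + 1 := ⟨fuel - 1, by omega⟩
    have hnpos : (0 : Int) < n := by omega
    rw [genAloop]
    rw [if_pos (by rw [pvL_len]; omega)]
    have hm16 : m < 65536 := by omega
    have hpow : (2 : Nat) ^ 16 = 65536 := by norm_num
    rw [if_pos (by
      rw [pvLandInt, ← pvMseq16]
      exact (pvLand_mseq 16 (pvSp m)).mpr (pvGood_sp 16 m (by omega)))]
    rw [pvL_succ]
    have hsplt : pvSp m < pvSp (m+1) := pvSp_lt (m+1) m (by omega)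
    by_cases he : m + 1 = n.toNat
    · rw [he]
      exact pvTerm n _ f
    · have hm1 : m + 1 < n.toNat := by omega
      have hmono1 : pvSp (m+1) ≤ pvSp (n.toNat - 1) := pvSp_le (m+1) (n.toNat - 1) (by omega)
      have hfm := hfuel hmlt
      have hc : ((pvSp m : Int) + 1) = ↑(pvSp m + 1) := by push_cast; ring
      rw [hc]
      rw [pvMarch n (m+1) (by omega) (pvSp (m+1) - (pvSp m + 1)) (pvSp m + 1) f
        (by omega)
        (fun j hj1 hj2 => pvNoBetween m j hm16 (by omega) (by omega))]
      have he2 : pvSp m + 1 + (pvSp (m+1) - (pvSp m + 1)) = pvSp (m+1) := by omega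
      rw [he2]
      exact ih (m+1) (f - (pvSp (m+1) - (pvSp m + 1))) (by omega) (by omega) (fun _ => by omega)

lemma pvSp_bound : ∀ (d k : Nat), k < 2 ^ d → pvSp k ≤ pvMseq d := by
  intro d
  induction d with
  | zero =>
    intro k hk
    have : k = 0 := by simpa using hk
    subst this
    simp [pvSp_zero, pvMseq]
  | succ d ih =>
    intro k hk
    rw [pvSp_eq]
    show 4 * pvSp (k / 2) + k % 2 ≤ 4 * pvMseq d + 1
    have h2 : k / 2 < 2 ^ d := by
      have := Nat.pow_succ 2 d
      omega
    have := ih (k / 2) h2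
    omega

-- ===== VERDICT (by name: the statement is the Claim_ definition above) =====
theorem generate_mdb_spec : Claim_equal_generate_mdb := by
  intro n _ hpre
  have hn' : n ≤ 65536 := hpre
  unfold Spec_generate_mdb
  rw [pvAlt]
  unfold generate_mdb
  have h0 : ([] : List Int) = pvL 0 := rfl
  have h1 : (0 : Int) = ((pvSp 0 : Nat) : Int) := by rw [pvSp_zero]; rfl
  rw [h0, h1]
  have hpow : (2 : Nat) ^ 16 = 65536 := by norm_num
  have hb : pvSp (n.toNat - 1) ≤ pvMseq 16 := pvSp_bound 16 (n.toNat - 1) (by omega)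
  rw [pvMseq16] at hb
  exact pvMain n hn' (n.toNat - 0) 0 0x55555556 rfl (by omega)
    (fun _ => by rw [pvSp_zero]; omega)
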